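-- pv_equiv track=rewrite | github.com/letai2001/python | python/Baitap10.xulichuoi.py | ChuanHoa
-- ===== SOURCE A (Python) =====
-- def ChuanHoa(a):
--     list = []
--     s = []
--     list2 = []
--     for i in range (len(a)):
--         s.append(a[i])
--     length= len(a)
--     for i in range (length):
--         if i<length-1:
--             if(s[i] == s[i+1] and s[i+1] == " ") :
--                 continue
--             else:
--                 list.append(s[i])
--         elif s[i]!=" ":
--             list.append(s[i])
--     newstring = ''.join(list)
--     string = newstring.strip()
--     string2 = string.lower()
--     for i in range (len(string2)):
--         if(i>=1):
--             if(string2[i-1]==" "):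
--                 list2.append(string2[i].upper())
--             else:
--                 list2.append(string2[i].lower())
--         else:
--                 list2.append(string2[i].upper())
--
--
--     newstring2 = ''.join(list2)
--
--
--
--
--     return newstring2
-- ===== SOURCE B (Python) =====
-- import re
--
-- def ChuanHoa(a):
--     # Collapse runs of SPACE (only) to a single space, then strip all
--     # leading/trailing whitespace, then capitalize each space-separated word.
--     s = re.sub(' +', ' ', a).strip()
--     return ' '.join(w[:1].upper() + w[1:] for w in (t.lower() for t in s.split(' ')))
-- ===== Notes on version B (the rewrite author's own statement) =====
-- stated objective: idiomatic
-- what changed: A's three char-by-char index loops (manual space-run collapse keeping the last space of a run and dropping a trailing space, then a prev-char state machine capitalizing after each space) are replaced by one regex collapse of space runs plus strip, a split into space-separated tokens, and a per-token lower/upper-first pass joined back with single spaces.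
import Mathlib
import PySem

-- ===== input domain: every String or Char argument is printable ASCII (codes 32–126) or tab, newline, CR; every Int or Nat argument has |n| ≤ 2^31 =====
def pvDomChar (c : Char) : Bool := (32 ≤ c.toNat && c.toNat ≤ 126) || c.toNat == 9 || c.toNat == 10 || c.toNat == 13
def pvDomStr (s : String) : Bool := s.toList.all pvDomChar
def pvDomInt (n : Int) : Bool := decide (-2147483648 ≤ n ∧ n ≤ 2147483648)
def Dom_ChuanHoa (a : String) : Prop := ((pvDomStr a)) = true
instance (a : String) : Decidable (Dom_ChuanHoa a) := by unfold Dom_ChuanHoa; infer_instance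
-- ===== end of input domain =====

-- B collapses the space runs once and capitalizes per word token (simpler decomposition),
-- instead of A's three char-by-char index loops; A mutates nothing, return values compared.

-- ===== PORT A =====
-- literal transliteration of A: three index loops; a[i]/s[i] are always in range, so the
-- pyGetD default ' ' is never used; ''.join(list-of-chars) is String.ofList / the char list itself.
def ChuanHoa (a : String) : String :=
  -- for i in range(len(a)): s.append(a[i])
  let length : Int := PySem.Str.len a
  let s : List Char :=
    (PySem.List.pyRange 0 length).foldl (fun acc i => acc ++ [PySem.List.pyGetD a.toList i ' ']) []
  -- for i in range(length): collapse runs of ' ' (keep last), drop a final ' '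
  let list : List Char :=
    (PySem.List.pyRange 0 length).foldl
      (fun acc i =>
        if i < length - 1 then
          if PySem.List.pyGetD s i ' ' = PySem.List.pyGetD s (i+1) ' ' ∧
             PySem.List.pyGetD s (i+1) ' ' = ' ' then acc
          else acc ++ [PySem.List.pyGetD s i ' ']
        else if PySem.List.pyGetD s i ' ' ≠ ' ' then acc ++ [PySem.List.pyGetD s i ' ']
        else acc) []
  let string : List Char := PySem.Chars.strip list      -- ''.join(list) then .strip()
  let string2 : List Char := PySem.Chars.lower string   -- .lower()
  -- for i in range(len(string2)): capitalize after a space / at position 0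
  let list2 : List Char :=
    (PySem.List.pyRange 0 (PySem.Chars.len string2)).foldl
      (fun acc i =>
        if 1 ≤ i then
          if PySem.List.pyGetD string2 (i-1) ' ' = ' ' then
            acc ++ [PySem.Chars.upperChar (PySem.List.pyGetD string2 i ' ')]
          else acc ++ [PySem.Chars.lowerChar (PySem.List.pyGetD string2 i ' ')]
        else acc ++ [PySem.Chars.upperChar (PySem.List.pyGetD string2 i ' ')]) []
  String.ofList list2

-- ===== PORT B =====
def bCollapse : List Char → List Char
  | [] => []
  | c :: cs =>
      if c = ' ' then ' ' :: bCollapse (cs.dropWhile (· == ' '))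
      else c :: bCollapse cs
termination_by l => l.length
decreasing_by
  · have := List.length_dropWhile_le (fun x => x == ' ') cs; simp; omega
  · simp

def capWord (w : List Char) : List Char :=
  match PySem.Chars.lower w with
  | [] => []
  | c :: cs => PySem.Chars.upperChar c :: cs

def ChuanHoa_alt (a : String) : String :=
  let s : List Char := PySem.Chars.strip (bCollapse a.toList)  -- re.sub(' +',' ',a).strip()
  String.ofList (PySem.Chars.join [' '] ((PySem.Chars.splitOn s [' ']).map capWord))

-- ===== PRECONDITION & SPEC =====
def Spec_ChuanHoa (a : String) (out : String) : Prop := out = ChuanHoa_alt a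
instance (a : String) (out : String) : Decidable (Spec_ChuanHoa a out) := by unfold Spec_ChuanHoa; infer_instance

-- ===== CLAIM (what is proved, stated in full; the proofs are below) =====
def Claim_equal_ChuanHoa : Prop := ∀ (a : String), Dom_ChuanHoa a → Spec_ChuanHoa a (ChuanHoa a)

-- ===== LEMMAS AND PROOFS =====

def colA : List Char → List Char
  | [] => []
  | [c] => if c ≠ ' ' then [c] else []
  | c :: d :: r => (if c = d ∧ d = ' ' then [] else [c]) ++ colA (d :: r)

def go2 : Bool → List Char → List Char
  | _, [] => []
  | st, c :: cs =>
      if c = ' ' then ' ' :: go2 true cs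
      else (if st then PySem.Chars.upperChar (PySem.Chars.lowerChar c)
            else PySem.Chars.lowerChar c) :: go2 false cs

def wsplit : List Char → List (List Char)
  | [] => [[]]
  | c :: cs =>
      if c = ' ' then [] :: wsplit cs
      else match wsplit cs with
           | [] => [[c]]
           | w :: ws => (c :: w) :: ws

def capGo : Char → List Char → List Char
  | _, [] => []
  | p, c :: cs =>
      (if p = ' ' then PySem.Chars.upperChar c else PySem.Chars.lowerChar c) :: capGo c cs

def capA : List Char → List Char
  | [] => []
  | c :: cs => PySem.Chars.upperChar c :: capGo c cs

def beh : List Char → List Char → List (List Char)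
  | cur, [] => [cur.reverse]
  | cur, c :: rest => if c = ' ' then cur.reverse :: beh [] rest else beh (c :: cur) rest

theorem charle {a b : Char} (h : a ≤ b) : a.toNat ≤ b.toNat :=
  UInt32.le_iff_toNat_le.mp (Char.le_def.mp h)

theorem lowerChar_eq_space_iff (c : Char) : PySem.Chars.lowerChar c = ' ' ↔ c = ' ' := by
  unfold PySem.Chars.lowerChar PySem.Chars.isupper
  split
  · rename_i h
    simp only [Bool.and_eq_true, decide_eq_true_eq] at h
    have h1 := charle h.1
    have h2 := charle h.2
    have hA : ('A').toNat = 65 := by decide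
    have hZ : ('Z').toNat = 90 := by decide
    have hv : (c.toNat + 32).isValidChar := by left; omega
    have ht : (Char.ofNat (c.toNat + 32)).toNat = c.toNat + 32 := by
      rw [Char.toNat_ofNat, if_pos hv]
    constructor
    · intro hc
      rw [hc] at ht
      have : (' ').toNat = 32 := by decide
      omega
    · intro hc; subst hc; simp at h1
  · exact Iff.rfl

theorem lowerChar_idem (c : Char) :
    PySem.Chars.lowerChar (PySem.Chars.lowerChar c) = PySem.Chars.lowerChar c := by
  unfold PySem.Chars.lowerChar PySem.Chars.isupper
  split
  · rename_i h
    simp only [Bool.and_eq_true, decide_eq_true_eq] at h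
    have h1 := charle h.1
    have h2 := charle h.2
    have hA : ('A').toNat = 65 := by decide
    have hZ : ('Z').toNat = 90 := by decide
    have hv : (c.toNat + 32).isValidChar := by left; omega
    have ht : (Char.ofNat (c.toNat + 32)).toNat = c.toNat + 32 := by
      rw [Char.toNat_ofNat, if_pos hv]
    rw [if_neg]
    intro hcon
    simp only [Bool.and_eq_true, decide_eq_true_eq] at hcon
    have := charle hcon.2
    omega
  · rfl

theorem bCollapse_colA (l : List Char) :
    bCollapse l = colA l ++ (if l.getLast? = some ' ' then [' '] else []) := by
  induction l with
  | nil => simp [bCollapse, colA]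
  | cons c cs ih =>
    cases cs with
    | nil =>
      by_cases hc : c = ' '
      · subst hc; simp [bCollapse, colA]
      · rw [bCollapse, if_neg hc]
        simp [bCollapse, colA, hc]
    | cons d r =>
      by_cases hc : c = ' '
      · subst hc
        by_cases hd : d = ' '
        · subst hd
          rw [colA]
          rw [if_pos ⟨rfl, rfl⟩]
          have e1 : bCollapse (' ' :: ' ' :: r) = bCollapse (' ' :: r) := by
            rw [bCollapse, if_pos rfl, bCollapse, if_pos rfl]
            simp
          rw [e1, ih]
          simp [List.getLast?_cons_cons]
        · rw [colA, if_neg (by simp [hd])]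
          rw [bCollapse, if_pos rfl]
          have : (d :: r).dropWhile (· == ' ') = d :: r := by
            rw [List.dropWhile_cons]
            simp [hd]
          rw [this]
          have e2 : bCollapse (d :: r) = bCollapse (d :: r) := rfl
          rw [ih]
          simp [List.getLast?_cons_cons]
      · rw [colA, if_neg (by intro h; exact hc (h.1.trans h.2))]
        rw [bCollapse, if_neg hc, ih]
        simp [List.getLast?_cons_cons]

theorem strip_append_space (x : List Char) :
    PySem.Chars.strip (x ++ [' ']) = PySem.Chars.strip x := by
  unfold PySem.Chars.strip PySem.Chars.lstrip PySem.Chars.rstrip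
  rw [List.dropWhile_append]
  by_cases h : (List.dropWhile PySem.Chars.isspace x).isEmpty
  · rw [if_pos h]
    rw [List.isEmpty_iff] at h
    rw [h]
    decide
  · rw [if_neg h]
    rw [List.reverse_append]
    simp only [List.reverse_cons, List.reverse_nil, List.nil_append, List.singleton_append]
    rw [List.dropWhile_cons]
    simp [show PySem.Chars.isspace ' ' = true from by decide]

theorem go_beh : ∀ (fuel : Nat) (l cur : List Char) (acc : List (List Char)),
    l.length < fuel →
    PySem.Chars.splitOn.go [' '] fuel l cur acc = acc.reverse ++ beh cur l := by
  intro fuel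
  induction fuel with
  | zero => intro l cur acc h; omega
  | succ f ih =>
    intro l cur acc h
    cases l with
    | nil =>
      rw [PySem.Chars.splitOn.go]
      · simp [beh]
      · omega
    | cons c rest =>
      rw [PySem.Chars.splitOn.go]
      by_cases hc : c = ' '
      · subst hc
        rw [if_pos (by simp [List.isPrefixOf])]
        simp only [List.length_cons] at h
        rw [ih _ _ _ (by simpa using Nat.lt_of_succ_lt_succ h)]
        simp [beh]
      · rw [if_neg (by simp [List.isPrefixOf]; exact fun hh => hc hh.symm)]
        simp only [List.length_cons] at h
        rw [ih _ _ _ (by omega)]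
        simp [beh, hc]

theorem beh_wsplit : ∀ (l cur : List Char),
    ∃ w ws, wsplit l = w :: ws ∧ beh cur l = (cur.reverse ++ w) :: ws := by
  intro l
  induction l with
  | nil => intro cur; exact ⟨[], [], rfl, by simp [beh]⟩
  | cons c r ih =>
    intro cur
    by_cases hc : c = ' '
    · subst hc
      obtain ⟨w, ws, h1, h2⟩ := ih []
      refine ⟨[], w :: ws, ?_, ?_⟩
      · rw [wsplit, if_pos rfl, h1]
      · rw [beh, if_pos rfl, h2]
        simp
    · obtain ⟨w, ws, h1, h2⟩ := ih (c :: cur)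
      refine ⟨c :: w, ws, ?_, ?_⟩
      · rw [wsplit, if_neg hc, h1]
      · rw [beh, if_neg hc, h2]
        simp

theorem splitOn_eq_wsplit (l : List Char) : PySem.Chars.splitOn l [' '] = wsplit l := by
  obtain ⟨w, ws, h1, h2⟩ := beh_wsplit l []
  unfold PySem.Chars.splitOn
  rw [go_beh _ _ _ _ (by omega), h2, h1]
  simp

theorem myjoin : ∀ (xs : List (List Char)) (x : List Char),
    PySem.Chars.join [' '] (x :: xs) = x ++ xs.flatMap (fun w => ' ' :: w) := by
  intro xs
  induction xs with
  | nil => intro x; simp [PySem.Chars.join, List.intercalate]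
  | cons y ys ih =>
    intro x
    have hy := ih y
    simp only [PySem.Chars.join, List.intercalate, List.intersperse] at hy ⊢
    simp only [List.flatten_cons, List.flatMap_cons]
    rw [hy]
    simp

theorem go2_words : ∀ (r : List Char),
    ∃ w ws, wsplit r = w :: ws ∧
      go2 true r = capWord w ++ ws.flatMap (fun v => ' ' :: capWord v) ∧
      go2 false r = PySem.Chars.lower w ++ ws.flatMap (fun v => ' ' :: capWord v) := by
  intro r
  induction r with
  | nil => exact ⟨[], [], rfl, by simp [go2, capWord, PySem.Chars.lower], by simp [go2, PySem.Chars.lower]⟩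
  | cons c cs ih =>
    obtain ⟨w, ws, h1, h2, h3⟩ := ih
    by_cases hc : c = ' '
    · subst hc
      refine ⟨[], w :: ws, ?_, ?_, ?_⟩
      · rw [wsplit, if_pos rfl, h1]
      · rw [go2, if_pos rfl, h2]
        simp [capWord, PySem.Chars.lower]
      · rw [go2, if_pos rfl, h2]
        simp [PySem.Chars.lower]
    · refine ⟨c :: w, ws, ?_, ?_, ?_⟩
      · rw [wsplit, if_neg hc, h1]
      · rw [go2, if_neg hc, if_pos rfl, h3]
        have : capWord (c :: w) = PySem.Chars.upperChar (PySem.Chars.lowerChar c) :: PySem.Chars.lower w := by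
          simp [capWord, PySem.Chars.lower]
        rw [this]
        simp
      · rw [go2, if_neg hc]
        simp only [Bool.false_eq_true, if_false]
        rw [h3]
        simp [PySem.Chars.lower]

theorem wsplit_join (u : List Char) :
    PySem.Chars.join [' '] ((wsplit u).map capWord) = go2 true u := by
  obtain ⟨w, ws, h1, h2, h3⟩ := go2_words u
  rw [h1, h2]
  simp only [List.map_cons]
  rw [myjoin]
  congr 1
  rw [List.flatMap_map]

theorem capGo_go2 : ∀ (cs : List Char) (p : Char),
    capGo (PySem.Chars.lowerChar p) (PySem.Chars.lower cs) = go2 (decide (p = ' ')) cs := by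
  intro cs
  induction cs with
  | nil => intro p; simp [capGo, go2, PySem.Chars.lower]
  | cons c cs' ih =>
    intro p
    show capGo _ (PySem.Chars.lowerChar c :: PySem.Chars.lower cs') = _
    rw [capGo, go2, ih c]
    by_cases hp : p = ' ' <;> by_cases hc : c = ' ' <;>
      simp [hp, hc, lowerChar_eq_space_iff, lowerChar_idem,
            (by decide : PySem.Chars.lowerChar ' ' = ' '),
            (by decide : PySem.Chars.upperChar ' ' = ' ')]

theorem capA_lower (u : List Char) : capA (PySem.Chars.lower u) = go2 true u := by
  cases u with
  | nil => simp [capA, PySem.Chars.lower, go2]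
  | cons c cs =>
    show capA (PySem.Chars.lowerChar c :: PySem.Chars.lower cs) = _
    rw [capA, capGo_go2 cs c, go2]
    by_cases hc : c = ' ' <;>
      simp [hc, (by decide : PySem.Chars.lowerChar ' ' = ' '),
            (by decide : PySem.Chars.upperChar ' ' = ' ')]

theorem loop2_suffix (s : List Char) (m k : Nat) (acc : List Char) (h : s.length - k = m) :
    (PySem.List.pyRange (k : Int) (s.length : Int)).foldl
      (fun acc i =>
        if i < (s.length : Int) - 1 then
          if PySem.List.pyGetD s i ' ' = PySem.List.pyGetD s (i+1) ' ' ∧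
             PySem.List.pyGetD s (i+1) ' ' = ' ' then acc
          else acc ++ [PySem.List.pyGetD s i ' ']
        else if PySem.List.pyGetD s i ' ' ≠ ' ' then acc ++ [PySem.List.pyGetD s i ' ']
        else acc) acc = acc ++ colA (s.drop k) := by
  induction m generalizing k acc with
  | zero =>
    have hk : s.length ≤ k := by omega
    rw [PySem.List.pyRange_one_eq_nil (by exact_mod_cast hk), List.drop_eq_nil_of_le hk]
    simp [colA]
  | succ n ih =>
    have hk : k < s.length := by omega
    rw [PySem.List.pyRange_one_cons (by exact_mod_cast hk)]
    simp only [List.foldl_cons]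
    have hget : PySem.List.pyGetD s (k : Int) ' ' = s[k] :=
      PySem.List.pyGetD_eq_getElem s ' ' (by positivity) (by exact_mod_cast hk)
    rw [List.drop_eq_getElem_cons hk]
    by_cases hlast : k + 1 < s.length
    · have hcond : ((k : Int) < (s.length : Int) - 1) := by omega
      have hget1 : PySem.List.pyGetD s ((k : Int) + 1) ' ' = s[k+1] := by
        have : ((k : Int) + 1) = ((k+1 : Nat) : Int) := by push_cast; ring
        rw [this]
        exact PySem.List.pyGetD_eq_getElem s ' ' (by positivity) (by exact_mod_cast hlast)
      rw [if_pos hcond, hget, hget1]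
      rw [List.drop_eq_getElem_cons hlast]
      have ihh := fun acc => ih (k+1) acc (by omega)
      rw [List.drop_eq_getElem_cons hlast] at ihh
      push_cast at ihh
      by_cases hc : s[k] = s[k+1] ∧ s[k+1] = ' '
      · rw [if_pos hc, ihh acc]
        show acc ++ colA _ = acc ++ colA (s[k] :: s[k+1] :: List.drop (k+1+1) s)
        rw [colA]
        rw [if_pos hc]
        simp
      · rw [if_neg hc, ihh (acc ++ [s[k]])]
        show _ = acc ++ colA (s[k] :: s[k+1] :: List.drop (k+1+1) s)
        rw [colA, if_neg hc]
        simp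
    · have hk1 : k + 1 = s.length := by omega
      have hcond : ¬ ((k : Int) < (s.length : Int) - 1) := by omega
      rw [if_neg hcond, hget]
      have hdrop : List.drop (k+1) s = [] := List.drop_eq_nil_of_le (by omega)
      rw [hdrop]
      have ihh := fun acc => ih (k+1) acc (by omega)
      rw [hdrop] at ihh
      push_cast at ihh
      by_cases hc : s[k] ≠ ' '
      · rw [if_pos hc, ihh (acc ++ [s[k]])]
        simp [colA, hc]
      · rw [if_neg hc, ihh acc]
        simp [colA, hc]

theorem loop2_eq (s : List Char) :
    (PySem.List.pyRange 0 ((s.length : Nat) : Int)).foldl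
      (fun acc i =>
        if i < (s.length : Int) - 1 then
          if PySem.List.pyGetD s i ' ' = PySem.List.pyGetD s (i+1) ' ' ∧
             PySem.List.pyGetD s (i+1) ' ' = ' ' then acc
          else acc ++ [PySem.List.pyGetD s i ' ']
        else if PySem.List.pyGetD s i ' ' ≠ ' ' then acc ++ [PySem.List.pyGetD s i ' ']
        else acc) [] = colA s := by
  have := loop2_suffix s s.length 0 [] (by omega)
  simpa using this

theorem loop3_suffix (t : List Char) (m k : Nat) (hk1 : 1 ≤ k) (hk2 : k ≤ t.length)
    (acc : List Char) (h : t.length - k = m) :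
    (PySem.List.pyRange (k : Int) (t.length : Int)).foldl
      (fun acc i =>
        if 1 ≤ i then
          if PySem.List.pyGetD t (i-1) ' ' = ' ' then
            acc ++ [PySem.Chars.upperChar (PySem.List.pyGetD t i ' ')]
          else acc ++ [PySem.Chars.lowerChar (PySem.List.pyGetD t i ' ')]
        else acc ++ [PySem.Chars.upperChar (PySem.List.pyGetD t i ' ')]) acc
      = acc ++ capGo (t[k-1]'(by omega)) (t.drop k) := by
  induction m generalizing k acc with
  | zero =>
    have hk : k = t.length := by omega
    rw [PySem.List.pyRange_one_eq_nil (by omega), List.drop_eq_nil_of_le (by omega)]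
    simp [capGo]
  | succ n ih =>
    have hk : k < t.length := by omega
    rw [PySem.List.pyRange_one_cons (by exact_mod_cast hk)]
    simp only [List.foldl_cons]
    have hgetp : PySem.List.pyGetD t ((k : Int) - 1) ' ' = t[k-1]'(by omega) := by
      have : ((k : Int) - 1) = ((k-1 : Nat) : Int) := by omega
      rw [this]
      exact PySem.List.pyGetD_eq_getElem t ' ' (by positivity) (by exact_mod_cast (by omega : k - 1 < t.length))
    have hget : PySem.List.pyGetD t (k : Int) ' ' = t[k] :=
      PySem.List.pyGetD_eq_getElem t ' ' (by positivity) (by exact_mod_cast hk)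
    rw [if_pos (by exact_mod_cast hk1 : (1:Int) ≤ (k:Int)), hgetp, hget]
    rw [List.drop_eq_getElem_cons hk]
    have ihh := fun acc => ih (k+1) (by omega) (by omega) acc (by omega)
    push_cast at ihh
    try simp only [Nat.add_sub_cancel] at ihh
    show _ = acc ++ capGo _ (t[k] :: List.drop (k+1) t)
    rw [capGo]
    by_cases hc : t[k-1]'(by omega) = ' '
    · rw [if_pos hc, if_pos hc, ihh (acc ++ [PySem.Chars.upperChar t[k]])]
      simp
    · rw [if_neg hc, if_neg hc, ihh (acc ++ [PySem.Chars.lowerChar t[k]])]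
      simp

theorem loop3_eq (t : List Char) :
    (PySem.List.pyRange 0 (PySem.Chars.len t)).foldl
      (fun acc i =>
        if 1 ≤ i then
          if PySem.List.pyGetD t (i-1) ' ' = ' ' then
            acc ++ [PySem.Chars.upperChar (PySem.List.pyGetD t i ' ')]
          else acc ++ [PySem.Chars.lowerChar (PySem.List.pyGetD t i ' ')]
        else acc ++ [PySem.Chars.upperChar (PySem.List.pyGetD t i ' ')]) [] = capA t := by
  rw [PySem.Chars.len_eq]
  match t with
  | [] => simp [PySem.List.pyRange_one_eq_nil, capA]
  | c :: cs =>
    have hlen : 0 < (c :: cs).length := by simp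
    rw [PySem.List.pyRange_one_cons (by exact_mod_cast hlen)]
    simp only [List.foldl_cons]
    rw [if_neg (by omega)]
    have hget : PySem.List.pyGetD (c :: cs) (0 : Int) ' ' = c := by
      exact PySem.List.pyGetD_eq_getElem (c :: cs) (i := 0) ' ' (by omega) (by exact_mod_cast hlen)
    rw [hget]
    have := loop3_suffix (c :: cs) cs.length 1 (by omega) (by simp) [PySem.Chars.upperChar c] (by simp)
    push_cast at this ⊢
    simp only [List.nil_append]
    rw [this]
    simp [capA]

theorem loop1_eq (a : String) :
    (PySem.List.pyRange 0 ((a.toList.length : Nat) : Int)).foldl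
      (fun acc i => acc ++ [PySem.List.pyGetD a.toList i ' ']) [] = a.toList := by
  rw [PySem.List.foldl_append_singleton_eq_map]
  have := PySem.List.map_pyGetD_pyRange_zero a.toList ' '
  rw [PySem.List.len_eq] at this
  simpa using this


-- ===== VERDICT (by name: the statement is the Claim_ definition above) =====
theorem ChuanHoa_spec : Claim_equal_ChuanHoa := by
  intro a _
  show ChuanHoa a = ChuanHoa_alt a
  simp only [ChuanHoa, ChuanHoa_alt, PySem.Str.len_eq, loop1_eq, loop2_eq, loop3_eq,
             splitOn_eq_wsplit, wsplit_join]
  rw [bCollapse_colA]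
  by_cases h : a.toList.getLast? = some ' '
  · rw [if_pos h, strip_append_space, capA_lower]
  · rw [if_neg h, List.append_nil, capA_lower]
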